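-- pv_equiv track=rewrite | github.com/ferpjm/Algorithm-analysis-design | dyv1/cifrasComunDyV.py | DyV
-- ===== SOURCE A (Python) =====
-- def extraerCifras(numero):
--     solucion = [False] * 10
--     while (numero > 0):
--         cifra = numero % 10
--         numero = numero // 10
--         solucion[cifra] = True
--     return solucion
--
-- def combinar(sol1, sol2):
--     solucion = [False] * 10
--     for i in range(len(sol1)):
--         if (sol1[i] == True) and (sol2[i] == True):
--             solucion[i] = True
--     return solucion
--
-- def DyV(numeros, ini, fin):
--     if (ini == fin):
--         # CONQUISTA
--         solucion = extraerCifras(numeros[ini])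
--         return solucion
--     else:
--         # DIVISION
--         medio = (ini + fin) // 2
--         solucion1 = DyV(numeros, ini, medio)
--         solucion2 = DyV(numeros, medio + 1, fin)
--         # COMBINACION
--         solucion = combinar(solucion1, solucion2)
--         return solucion
-- ===== SOURCE B (Python) =====
-- def cifras(n):
--     # digit set of n as a 10-flag list, built recursively (all False for n <= 0, as in A)
--     if n <= 0:
--         return [False] * 10
--     resto = cifras(n // 10)
--     d = n % 10
--     return [resto[i] or i == d for i in range(10)]
--
-- def DyV(numeros, ini, fin):
--     comun = cifras(numeros[ini])
--     for i in range(ini + 1, fin + 1):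
--         c = cifras(numeros[i])
--         comun = [a and b for a, b in zip(comun, c)]
--     return comun
-- ===== Notes on version B (the rewrite author's own statement) =====
-- stated objective: simpler
-- what changed: Replaces the divide-and-conquer recursion with a single left-to-right fold that intersects the digit sets, and builds each digit set recursively with a comprehension instead of in-place mutation of a [False]*10 list.
import Mathlib
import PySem

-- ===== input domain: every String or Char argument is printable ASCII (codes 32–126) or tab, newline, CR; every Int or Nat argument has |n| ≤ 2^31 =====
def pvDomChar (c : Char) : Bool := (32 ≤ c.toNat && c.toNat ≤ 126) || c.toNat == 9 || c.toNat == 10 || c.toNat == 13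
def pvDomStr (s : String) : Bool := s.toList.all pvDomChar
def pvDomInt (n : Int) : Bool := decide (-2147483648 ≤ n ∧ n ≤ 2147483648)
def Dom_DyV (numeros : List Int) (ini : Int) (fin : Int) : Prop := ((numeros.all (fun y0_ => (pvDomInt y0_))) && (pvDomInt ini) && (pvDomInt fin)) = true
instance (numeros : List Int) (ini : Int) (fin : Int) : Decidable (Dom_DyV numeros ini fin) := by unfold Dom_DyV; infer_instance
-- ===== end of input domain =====

-- B replaces A's divide-and-conquer recursion by a single left-to-right fold intersecting
-- recursively-built digit sets (objective: simpler); equivalence is about the return value.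

-- ===== PORT A =====
-- while numero > 0: set digit flag (in-place list mutation ported as List set via pySetD);
-- fuel makes the loop structural; numero.toNat + 1 iterations always suffice (value shrinks by /10)
def extraerCifrasAux (fuel : Nat) (numero : Int) (solucion : List Bool) : List Bool :=
  match fuel with
  | 0 => solucion
  | fuel + 1 =>
    if numero > 0 then
      extraerCifrasAux fuel (PySem.Int.floordiv numero 10)
        (PySem.List.pySetD solucion (PySem.Int.mod numero 10) true)
    else solucion

def extraerCifras (numero : Int) : List Bool :=
  extraerCifrasAux (numero.toNat + 1) numero (List.replicate 10 false)

def combinar (sol1 : List Bool) (sol2 : List Bool) : List Bool :=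
  (PySem.List.pyRange 0 (sol1.length : Int) 1).foldl
    (fun solucion i =>
      if (PySem.List.pyGetD sol1 i false == true) && (PySem.List.pyGetD sol2 i false == true) then
        PySem.List.pySetD solucion i true
      else solucion)
    (List.replicate 10 false)

-- fuel makes the recursion total; with ini ≤ fin (Pre_) the fuel is never exhausted
def DyVgo (fuel : Nat) (numeros : List Int) (ini : Int) (fin : Int) : List Bool :=
  match fuel with
  | 0 => []
  | fuel + 1 =>
    if ini == fin then
      match PySem.List.pyGet? numeros ini with   -- numeros[ini]; none = IndexError, excluded by Pre_
      | some v => extraerCifras v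
      | none => []
    else
      let medio := PySem.Int.floordiv (ini + fin) 2
      combinar (DyVgo fuel numeros ini medio) (DyVgo fuel numeros (medio + 1) fin)

def DyV (numeros : List Int) (ini : Int) (fin : Int) : List Bool :=
  DyVgo ((fin - ini).toNat + 1) numeros ini fin

-- ===== PORT B =====
-- digit set of n, built recursively (fuel as above makes the recursion structural)
def cifrasAux (fuel : Nat) (n : Int) : List Bool :=
  match fuel with
  | 0 => List.replicate 10 false
  | fuel + 1 =>
    if n ≤ 0 then List.replicate 10 false
    else
      let resto := cifrasAux fuel (PySem.Int.floordiv n 10)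
      let d := PySem.Int.mod n 10
      (PySem.List.pyRange 0 10 1).map (fun i => PySem.List.pyGetD resto i false || (i == d))

def cifras (n : Int) : List Bool := cifrasAux (n.toNat + 1) n

def DyV_alt (numeros : List Int) (ini : Int) (fin : Int) : List Bool :=
  match PySem.List.pyGet? numeros ini with       -- numeros[ini]; none = IndexError, excluded by Pre_
  | none => []
  | some v =>
    (PySem.List.pyRange (ini + 1) (fin + 1) 1).foldl
      (fun comun i =>
        match PySem.List.pyGet? numeros i with
        | none => []                             -- IndexError, excluded by Pre_
        | some w => List.zipWith (· && ·) comun (cifras w))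
      (cifras v)

-- ===== PRECONDITION & SPEC =====
-- exactly where A returns: valid range and both endpoints valid Python indices
-- (ini > fin → RecursionError; an endpoint out of [-len, len) → IndexError)
def Pre_DyV (numeros : List Int) (ini : Int) (fin : Int) : Prop :=
  ini ≤ fin ∧ -(numeros.length : Int) ≤ ini ∧ fin < (numeros.length : Int)
instance (numeros : List Int) (ini : Int) (fin : Int) : Decidable (Pre_DyV numeros ini fin) := by
  unfold Pre_DyV; infer_instance

def pvWitness_DyV : List Int × Int × Int := ([123, 21], 0, 1)

def Spec_DyV (numeros : List Int) (ini : Int) (fin : Int) (out : List Bool) : Prop := out = DyV_alt numeros ini fin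
instance (numeros : List Int) (ini : Int) (fin : Int) (out : List Bool) : Decidable (Spec_DyV numeros ini fin out) := by unfold Spec_DyV; infer_instance

-- ===== CLAIM (what is proved, stated in full; the proofs are below) =====
def Claim_equal_DyV : Prop := ∀ (numeros : List Int) (ini : Int) (fin : Int), Dom_DyV numeros ini fin → Pre_DyV numeros ini fin → Spec_DyV numeros ini fin (DyV numeros ini fin)

-- ===== LEMMAS AND PROOFS =====

-- ten-element destructuring of a length-10 list
theorem len10_exists (l : List Bool) (h : l.length = 10) :
    ∃ a0 a1 a2 a3 a4 a5 a6 a7 a8 a9, l = [a0, a1, a2, a3, a4, a5, a6, a7, a8, a9] := by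
  match l, h with
  | [a0, a1, a2, a3, a4, a5, a6, a7, a8, a9], _ =>
    exact ⟨_, _, _, _, _, _, _, _, _, _, rfl⟩

theorem cifrasAux_length (fuel : Nat) (n : Int) : (cifrasAux fuel n).length = 10 := by
  cases fuel with
  | zero => simp [cifrasAux]
  | succ f =>
    rw [cifrasAux]
    split
    · simp
    · simp [PySem.List.length_pyRange_one]

theorem cifras_length (n : Int) : (cifras n).length = 10 := cifrasAux_length _ _

theorem div10_toNat_lt (n : Int) (h : 0 < n) :
    (PySem.Int.floordiv n 10).toNat < n.toNat := by
  have h2 : PySem.Int.floordiv n 10 < n :=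
    (PySem.Int.floordiv_lt_iff_lt_mul (by omega)).mpr (by omega)
  have h3 : 0 ≤ PySem.Int.floordiv n 10 :=
    (PySem.Int.le_floordiv_iff_mul_le (by omega)).mpr (by omega)
  omega

theorem zw_assoc (a b c : List Bool) :
    List.zipWith (· && ·) (List.zipWith (· && ·) a b) c =
      List.zipWith (· && ·) a (List.zipWith (· && ·) b c) := by
  induction a generalizing b c with
  | nil => simp
  | cons x xs ih =>
    cases b with
    | nil => simp
    | cons y ys =>
      cases c with
      | nil => simp
      | cons z zs => simp [Bool.and_assoc, ih]

theorem zw_one_left (l : List Bool) (h : l.length = 10) :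
    List.zipWith (· && ·) (List.replicate 10 true) l = l := by
  obtain ⟨a0, a1, a2, a3, a4, a5, a6, a7, a8, a9, rfl⟩ := len10_exists l h
  simp [List.replicate]

theorem zw_one_right (l : List Bool) (h : l.length = 10) :
    List.zipWith (· && ·) l (List.replicate 10 true) = l := by
  obtain ⟨a0, a1, a2, a3, a4, a5, a6, a7, a8, a9, rfl⟩ := len10_exists l h
  simp [List.replicate]

theorem zwor_zero_left (l : List Bool) (h : l.length = 10) :
    List.zipWith (· || ·) (List.replicate 10 false) l = l := by
  obtain ⟨a0, a1, a2, a3, a4, a5, a6, a7, a8, a9, rfl⟩ := len10_exists l h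
  simp [List.replicate]

theorem set_false_of_getD_false (l : List Bool) (i : Nat) (h : l.getD i false = false) :
    l.set i false = l := by
  induction l generalizing i with
  | nil => rfl
  | cons x xs ih =>
    cases i with
    | zero => simp_all
    | succ j => simp_all

theorem if_set' (x y : Bool) (l : List Bool) (i : Int) (h0 : 0 ≤ i)
    (h : l.getD i.toNat false = false) :
    (if (x = true ∧ y = true) then PySem.List.pySetD l i true else l) = l.set i.toNat (x && y) := by
  rw [PySem.List.pySetD_of_nonneg l true h0]
  cases x <;> cases y <;> simp [set_false_of_getD_false l _ h]

-- extraerCifras computes the same digit-flag list as cifras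
set_option maxHeartbeats 2000000 in
theorem aux_eq (fuel : Nat) (n : Int) (sol : List Bool) (hf : n.toNat < fuel) (h : sol.length = 10) :
    extraerCifrasAux fuel n sol = List.zipWith (· || ·) (cifrasAux fuel n) sol := by
  induction fuel generalizing n sol with
  | zero => omega
  | succ f ih =>
    by_cases hn : n > 0
    · have hd0 : 0 ≤ PySem.Int.mod n 10 := PySem.Int.mod_nonneg n (by omega)
      have hd9 : PySem.Int.mod n 10 < 10 := PySem.Int.mod_lt n (by omega)
      have hdiv := div10_toNat_lt n hn
      rw [show extraerCifrasAux (f + 1) n sol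
            = extraerCifrasAux f (PySem.Int.floordiv n 10)
                (PySem.List.pySetD sol (PySem.Int.mod n 10) true) by
            rw [extraerCifrasAux]; simp [hn]]
      rw [PySem.List.pySetD_of_nonneg sol true hd0]
      rw [ih (PySem.Int.floordiv n 10) _ (by omega) (by simp [h])]
      rw [show cifrasAux (f + 1) n
            = (PySem.List.pyRange 0 10 1).map
                (fun i => PySem.List.pyGetD (cifrasAux f (PySem.Int.floordiv n 10)) i false
                  || (i == PySem.Int.mod n 10)) by
            rw [cifrasAux]; simp [show ¬ n ≤ 0 by omega]]
      obtain ⟨r0, r1, r2, r3, r4, r5, r6, r7, r8, r9, hr⟩ :=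
        len10_exists (cifrasAux f (PySem.Int.floordiv n 10)) (cifrasAux_length _ _)
      obtain ⟨s0, s1, s2, s3, s4, s5, s6, s7, s8, s9, rfl⟩ := len10_exists sol h
      rw [hr]
      rw [show PySem.List.pyRange 0 10 1 = [0,1,2,3,4,5,6,7,8,9] by decide]
      set d := PySem.Int.mod n 10 with hdd
      interval_cases d <;>
        simp [List.map, PySem.List.pyGetD_ofNat', show ((0:Int)).toNat = 0 from rfl, show ((1:Int)).toNat = 1 from rfl, show ((2:Int)).toNat = 2 from rfl, show ((3:Int)).toNat = 3 from rfl, show ((4:Int)).toNat = 4 from rfl, show ((5:Int)).toNat = 5 from rfl, show ((6:Int)).toNat = 6 from rfl, show ((7:Int)).toNat = 7 from rfl, show ((8:Int)).toNat = 8 from rfl, show ((9:Int)).toNat = 9 from rfl]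
    · rw [extraerCifrasAux, cifrasAux]
      simp only [if_neg hn, if_pos (by omega : n ≤ 0)]
      exact (zwor_zero_left _ h).symm

theorem extraer_eq_cifras (n : Int) : extraerCifras n = cifras n := by
  have h := aux_eq (n.toNat + 1) n (List.replicate 10 false) (by omega) (by simp)
  rw [extraerCifras, h, cifras]
  obtain ⟨a0, a1, a2, a3, a4, a5, a6, a7, a8, a9, hc⟩ :=
    len10_exists (cifrasAux (n.toNat + 1) n) (cifrasAux_length _ _)
  rw [hc]
  simp [List.replicate]

theorem pyGet?_eq_some_pyGetD (xs : List Int) (i : Int)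
    (h1 : -(xs.length : Int) ≤ i) (h2 : i < (xs.length : Int)) :
    PySem.List.pyGet? xs i = some (PySem.List.pyGetD xs i 0) := by
  simp [PySem.List.pyGetD]
  cases h : PySem.List.pyGet? xs i with
  | some v => rfl
  | none =>
    rw [PySem.List.pyGet?_eq_none_iff] at h
    exact absurd (by constructor <;> omega) h

-- combinar on length-10 lists is pointwise AND
set_option maxHeartbeats 2000000 in
theorem combinar_eq (s1 s2 : List Bool) (h1 : s1.length = 10) (h2 : s2.length = 10) :
    combinar s1 s2 = List.zipWith (· && ·) s1 s2 := by
  obtain ⟨a0, a1, a2, a3, a4, a5, a6, a7, a8, a9, rfl⟩ := len10_exists s1 h1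
  obtain ⟨b0, b1, b2, b3, b4, b5, b6, b7, b8, b9, rfl⟩ := len10_exists s2 h2
  have hR : PySem.List.pyRange 0 10 1 = [0,1,2,3,4,5,6,7,8,9] := by decide
  simp only [combinar, List.length_cons, List.length_nil]
  norm_num
  rw [hR]
  simp only [List.foldl_cons, List.foldl_nil]
  norm_num [PySem.List.pyGetD_ofNat', if_set', show ((0:Int)).toNat = 0 from rfl, show ((1:Int)).toNat = 1 from rfl, show ((2:Int)).toNat = 2 from rfl, show ((3:Int)).toNat = 3 from rfl, show ((4:Int)).toNat = 4 from rfl, show ((5:Int)).toNat = 5 from rfl, show ((6:Int)).toNat = 6 from rfl, show ((7:Int)).toNat = 7 from rfl, show ((8:Int)).toNat = 8 from rfl, show ((9:Int)).toNat = 9 from rfl]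
  simp [List.replicate, List.set_cons_zero, List.set_cons_succ]

-- the left fold of digit intersections over [ini, fin]
def inter (numeros : List Int) (ini fin : Int) : List Bool :=
  (PySem.List.pyRange ini (fin + 1) 1).foldl
    (fun c i => List.zipWith (· && ·) c (cifras (PySem.List.pyGetD numeros i 0)))
    (List.replicate 10 true)

theorem foldl_zw (g : Int → List Bool) (hg : ∀ i, (g i).length = 10) :
    ∀ (l : List Int) (a : List Bool), a.length = 10 →
      l.foldl (fun c i => List.zipWith (· && ·) c (g i)) a =
        List.zipWith (· && ·) a
          (l.foldl (fun c i => List.zipWith (· && ·) c (g i)) (List.replicate 10 true)) := by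
  intro l
  induction l with
  | nil =>
    intro a ha
    simp only [List.foldl_nil]
    exact (zw_one_right a ha).symm
  | cons x xs ih =>
    intro a ha
    simp only [List.foldl_cons]
    rw [ih (List.zipWith (· && ·) a (g x)) (by simp [ha, hg x]),
        zw_assoc, zw_one_left (g x) (hg x), ih (g x) (hg x)]

theorem foldl_zw_length (g : Int → List Bool) (hg : ∀ i, (g i).length = 10) :
    ∀ (l : List Int) (a : List Bool), a.length = 10 →
      (l.foldl (fun c i => List.zipWith (· && ·) c (g i)) a).length = 10 := by
  intro l
  induction l with
  | nil => intro a ha; simpa using ha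
  | cons x xs ih =>
    intro a ha
    simp only [List.foldl_cons]
    exact ih _ (by simp [ha, hg x])

theorem inter_length (numeros : List Int) (ini fin : Int) : (inter numeros ini fin).length = 10 :=
  foldl_zw_length _ (fun i => cifras_length _) _ _ (by simp)

theorem A_eq_inter (numeros : List Int) :
    ∀ (fuel : Nat) (ini fin : Int), ini ≤ fin → (fin - ini).toNat < fuel →
      -(numeros.length : Int) ≤ ini → fin < (numeros.length : Int) →
      DyVgo fuel numeros ini fin = inter numeros ini fin := by
  intro fuel
  induction fuel with
  | zero => intro ini fin _ hfuel _ _; omega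
  | succ f ih =>
    intro ini fin hle hfuel hlo hhi
    by_cases heq : ini = fin
    · subst heq
      rw [DyVgo]
      simp only [BEq.rfl, if_pos]
      rw [pyGet?_eq_some_pyGetD numeros ini hlo (by omega)]
      rw [inter, PySem.List.pyRange_one_singleton, List.foldl_cons, List.foldl_nil,
          zw_one_left _ (cifras_length _)]
      exact extraer_eq_cifras _
    · have hlt : ini < fin := by omega
      have hm1 : ini ≤ PySem.Int.floordiv (ini + fin) 2 :=
        (PySem.Int.floordiv_two_mid_bounds hle).1
      have hm2 : PySem.Int.floordiv (ini + fin) 2 < fin :=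
        (PySem.Int.floordiv_lt_iff_lt_mul (by omega)).mpr (by omega)
      rw [DyVgo]
      simp only [show (ini == fin) = false by simp [heq], Bool.false_eq_true, if_false]
      rw [ih ini (PySem.Int.floordiv (ini + fin) 2) hm1 (by omega) hlo (by omega)]
      rw [ih (PySem.Int.floordiv (ini + fin) 2 + 1) fin (by omega) (by omega) (by omega) hhi]
      rw [combinar_eq _ _ (inter_length _ _ _) (inter_length _ _ _)]
      have hsplit : inter numeros ini fin =
          List.zipWith (· && ·) (inter numeros ini (PySem.Int.floordiv (ini + fin) 2))
            (inter numeros (PySem.Int.floordiv (ini + fin) 2 + 1) fin) := by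
        unfold inter
        rw [PySem.List.pyRange_one_append ini (PySem.Int.floordiv (ini + fin) 2 + 1) (fin + 1)
              (by omega) (by omega), List.foldl_append]
        exact foldl_zw _ (fun i => cifras_length _) _ _
          (foldl_zw_length _ (fun i => cifras_length _) _ _ (by simp))
      rw [hsplit]

theorem B_eq_inter (numeros : List Int) (ini fin : Int) (h1 : ini ≤ fin)
    (h2 : -(numeros.length : Int) ≤ ini) (h3 : fin < (numeros.length : Int)) :
    DyV_alt numeros ini fin = inter numeros ini fin := by
  rw [DyV_alt, pyGet?_eq_some_pyGetD numeros ini h2 (by omega)]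
  dsimp only
  rw [PySem.List.foldl_congr_mem _ _
        (fun comun i => List.zipWith (· && ·) comun (cifras (PySem.List.pyGetD numeros i 0))) _
        (by
          intro acc i hi
          rw [PySem.List.mem_pyRange_one] at hi
          rw [pyGet?_eq_some_pyGetD numeros i (by omega) (by omega)])]
  rw [inter, PySem.List.pyRange_one_cons (by omega : ini < fin + 1), List.foldl_cons,
      zw_one_left _ (cifras_length _)]

-- ===== VERDICT (by name: the statement is the Claim_ definition above) =====
theorem DyV_spec : Claim_equal_DyV := by
  intro numeros ini fin _ hpre
  obtain ⟨h1, h2, h3⟩ := hpre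
  unfold Spec_DyV DyV
  rw [B_eq_inter numeros ini fin h1 h2 h3]
  exact A_eq_inter numeros ((fin - ini).toNat + 1) ini fin h1 (by omega) h2 h3
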